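-- pv_equiv track=rewrite | github.com/saltie2193/aoc2022 | day10/part2.py | get_screen
-- ===== SOURCE A (Python) =====
-- def get_screen(active: list[int], width: int, lines: int) -> str:
--     res = ""
--     for i in range(width * lines):
--         if i != 0 and i % width == 0:
--             res += "\n"
--
--         if i in active:
--             res += "#"
--         else:
--             res += "."
--
--     return res
-- ===== SOURCE B (Python) =====
-- def get_screen(active: list[int], width: int, lines: int) -> str:
--     if width <= 0 or lines <= 0:
--         return ""
--     active_set = set(active)
--     rows = []
--     for r in range(lines):
--         rows.append("".join("#" if r * width + c in active_set else "." for c in range(width)))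
--     return "\n".join(rows)
-- ===== Notes on version B (the rewrite author's own statement) =====
-- stated objective: faster
-- what changed: Replaces the flat index loop (with an O(len(active)) list-membership test and inline i%width newline test per pixel) by a rows-by-columns decomposition: a set of active pixels built once, each row produced with a join over columns, rows joined with a newline; nonpositive dimensions yield the empty screen.
-- intended difference: When width<0 and lines<0 (so width*lines>0), A renders a phantom |width|x|lines| grid via Python's negative-divisor modulo, e.g. '#.' for ([0],-2,-1); B returns the empty string, the intended screen for nonpositive dimensions. — e.g. on get_screen([0], -2, -1): A returns "#.", B returns ""
import Mathlib
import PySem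

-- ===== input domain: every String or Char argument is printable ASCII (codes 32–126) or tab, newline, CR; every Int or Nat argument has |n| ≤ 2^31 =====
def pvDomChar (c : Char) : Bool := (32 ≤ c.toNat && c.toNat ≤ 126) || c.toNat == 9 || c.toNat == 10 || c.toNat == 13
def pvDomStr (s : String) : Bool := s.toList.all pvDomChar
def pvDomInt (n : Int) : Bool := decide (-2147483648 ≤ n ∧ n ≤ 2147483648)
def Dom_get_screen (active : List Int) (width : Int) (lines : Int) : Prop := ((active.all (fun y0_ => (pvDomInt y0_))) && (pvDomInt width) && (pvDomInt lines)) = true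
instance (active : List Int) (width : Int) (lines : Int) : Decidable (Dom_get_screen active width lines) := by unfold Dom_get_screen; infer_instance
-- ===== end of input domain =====

-- B renders the screen row by row (pixel set + join) instead of A's flat index loop; return value only, no mutation.

-- ===== PORT A =====
def get_screen (active : List Int) (width : Int) (lines : Int) : String :=
  (PySem.List.pyRange 0 (width * lines) 1).foldl
    (fun res i =>
      let res := if i ≠ 0 ∧ PySem.Int.mod i width = 0 then res ++ "\n" else res
      if i ∈ active then res ++ "#" else res ++ ".")
    ""

-- ===== PORT B =====
def get_screen_alt (active : List Int) (width : Int) (lines : Int) : String :=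
  if width ≤ 0 ∨ lines ≤ 0 then ""
  else
    let activeSet := PySem.Set.ofList active
    let rows := (PySem.List.pyRange 0 lines 1).map (fun r =>
      PySem.Str.join "" ((PySem.List.pyRange 0 width 1).map (fun c =>
        if PySem.Set.contains activeSet (r * width + c) then "#" else ".")))
    PySem.Str.join "\n" rows

-- ===== PRECONDITION & SPEC =====
-- When width<0 and lines<0 (so width*lines>0), A renders a phantom |width|×|lines| grid via Python's
-- negative-divisor modulo (e.g. "#." for ([0],-2,-1)); B returns "", the intended screen for nonpositive dimensions.
def D_get_screen (active : List Int) (width : Int) (lines : Int) : Prop := width < 0 ∧ lines < 0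
instance (active : List Int) (width : Int) (lines : Int) : Decidable (D_get_screen active width lines) := by unfold D_get_screen; infer_instance

def Spec_get_screen (active : List Int) (width : Int) (lines : Int) (out : String) : Prop := ¬ D_get_screen active width lines → out = get_screen_alt active width lines
instance (active : List Int) (width : Int) (lines : Int) (out : String) : Decidable (Spec_get_screen active width lines out) := by unfold Spec_get_screen; infer_instance

def pvDiffWitness_get_screen : List Int × Int × Int := ([0], -2, -1)
def pvDiffWitnessOut_get_screen : String × String := ("#.", "")

-- ===== CLAIM (what is proved, stated in full; the proofs are below) =====
def Claim_unchanged_get_screen : Prop := ∀ (active : List Int) (width : Int) (lines : Int), Dom_get_screen active width lines → Spec_get_screen active width lines (get_screen active width lines)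
def Claim_changed_get_screen : Prop := Dom_get_screen (pvDiffWitness_get_screen.1) (pvDiffWitness_get_screen.2.1) (pvDiffWitness_get_screen.2.2) ∧ D_get_screen (pvDiffWitness_get_screen.1) (pvDiffWitness_get_screen.2.1) (pvDiffWitness_get_screen.2.2) ∧ get_screen (pvDiffWitness_get_screen.1) (pvDiffWitness_get_screen.2.1) (pvDiffWitness_get_screen.2.2) = pvDiffWitnessOut_get_screen.1 ∧ get_screen_alt (pvDiffWitness_get_screen.1) (pvDiffWitness_get_screen.2.1) (pvDiffWitness_get_screen.2.2) = pvDiffWitnessOut_get_screen.2 ∧ pvDiffWitnessOut_get_screen.1 ≠ pvDiffWitnessOut_get_screen.2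
def Claim_exact_get_screen : Prop := ∀ (active : List Int) (width : Int) (lines : Int), Dom_get_screen active width lines → D_get_screen active width lines → get_screen active width lines ≠ get_screen_alt active width lines

-- ===== LEMMAS AND PROOFS =====

/-- one screen cell as a character -/
def pvCell (active : List Int) (j : Int) : Char := if j ∈ active then '#' else '.'

/-- what A's loop body appends for index i -/
def pvGA (active : List Int) (w i : Int) : List Char :=
  (if i ≠ 0 ∧ PySem.Int.mod i w = 0 then ['\n'] else []) ++ [pvCell active i]

/-- one row of B's screen, as characters -/
def pvRow (active : List Int) (w r : Int) : List Char :=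
  (PySem.List.pyRange 0 w 1).map (fun c => pvCell active (r * w + c))

lemma pv_foldA (active : List Int) (w : Int) (r : List Int) (s : String) :
    ((r.foldl (fun res i =>
        let res := if i ≠ 0 ∧ PySem.Int.mod i w = 0 then res ++ "\n" else res
        if i ∈ active then res ++ "#" else res ++ ".") s)).toList
      = s.toList ++ r.flatMap (pvGA active w) := by
  induction r generalizing s with
  | nil => simp
  | cons i rest ih =>
    simp only [List.foldl_cons, List.flatMap_cons, ih]
    by_cases h1 : i ≠ 0 ∧ PySem.Int.mod i w = 0 <;> by_cases h2 : i ∈ active <;>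
      simp [pvGA, pvCell, h1, h2, String.toList_append]

lemma pv_flatMap_eq_map (active : List Int) (w : Int) (l : List Int)
    (h : ∀ i ∈ l, pvGA active w i = [pvCell active i]) :
    l.flatMap (pvGA active w) = l.map (pvCell active) := by
  induction l with
  | nil => simp
  | cons i rest ih =>
    simp only [List.flatMap_cons, List.map_cons, h i (by simp)]
    rw [ih (fun j hj => h j (by simp [hj]))]
    rfl

lemma pv_join_snoc (sep y : List Char) (x : List Char) (xs : List (List Char)) :
    PySem.Chars.join sep ((x :: xs) ++ [y]) = PySem.Chars.join sep (x :: xs) ++ sep ++ y := by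
  induction xs generalizing x with
  | nil => simp [PySem.Chars.join_cons_cons, PySem.Chars.join_singleton]
  | cons z zs ih =>
    rw [List.cons_append, List.cons_append, PySem.Chars.join_cons_cons,
        ← List.cons_append, ih z, PySem.Chars.join_cons_cons]
    simp [List.append_assoc]

lemma pv_blockA (active : List Int) (w r a b : Int) (hw : 0 < w) (hr : 0 ≤ r)
    (ha : a = w * r) (hb : b = a + w) :
    (PySem.List.pyRange a b 1).flatMap (pvGA active w)
      = (if r = 0 then [] else ['\n']) ++ pvRow active w r := by
  subst hb; subst ha
  rw [PySem.List.pyRange_one_cons (by omega : w * r < w * r + w)]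
  simp only [List.flatMap_cons]
  have hmod : PySem.Int.mod (w * r) w = 0 :=
    (PySem.Int.mod_eq_zero_iff_dvd _ _).mpr ⟨r, rfl⟩
  have hhead : pvGA active w (w * r) = (if r = 0 then [] else ['\n']) ++ [pvCell active (w * r)] := by
    by_cases hr0 : r = 0
    · subst hr0; simp [pvGA]
    · have hne : w * r ≠ 0 := by
        intro h
        rcases mul_eq_zero.mp h with h | h
        · omega
        · exact hr0 h
      simp [pvGA, hmod, hne, hr0]
  have hwr : 0 ≤ w * r := mul_nonneg (le_of_lt hw) hr
  have htail : (PySem.List.pyRange (w * r + 1) (w * r + w) 1).flatMap (pvGA active w)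
      = (PySem.List.pyRange (w * r + 1) (w * r + w) 1).map (pvCell active) := by
    apply pv_flatMap_eq_map
    intro i hi
    rw [PySem.List.mem_pyRange_one] at hi
    have hieq : PySem.Int.mod i w = i - w * r := by
      rw [PySem.Int.mod_eq_emod_of_pos hw]
      have h1 : i % w = (i - w * r) % w := by
        conv_lhs => rw [show i = i - w * r + w * r by ring]
        exact Int.add_mul_emod_self_left (i - w * r) w r
      rw [h1, Int.emod_eq_of_lt (by omega) (by omega)]
    have hne0 : i ≠ 0 := by omega
    have : ¬ (i ≠ 0 ∧ PySem.Int.mod i w = 0) := by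
      rintro ⟨-, hz⟩; omega
    simp [pvGA, this]
  rw [htail, hhead]
  have hrow : pvCell active (w * r) :: (PySem.List.pyRange (w * r + 1) (w * r + w) 1).map (pvCell active)
      = pvRow active w r := by
    rw [← List.map_cons, ← PySem.List.pyRange_one_cons (by omega : w * r < w * r + w)]
    unfold pvRow
    rw [PySem.List.pyRange_one (w * r) (w * r + w), PySem.List.pyRange_one 0 w]
    simp only [List.map_map, add_sub_cancel_left, sub_zero]
    apply List.map_congr_left
    intro k _
    simp [mul_comm w r]
  rw [← hrow]
  simp [List.append_assoc]

lemma pv_main (active : List Int) (w : Int) (hw : 0 < w) (n : Nat) :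
    (PySem.List.pyRange 0 (w * ((n : Int) + 1)) 1).flatMap (pvGA active w)
      = PySem.Chars.join ['\n'] ((PySem.List.pyRange 0 ((n : Int) + 1) 1).map (pvRow active w)) := by
  induction n with
  | zero =>
    simp only [Nat.cast_zero, zero_add]
    rw [pv_blockA active w 0 0 (w * 1) hw le_rfl (by ring) (by ring)]
    rw [show PySem.List.pyRange 0 1 1 = [0] from by decide]
    simp [PySem.Chars.join_singleton]
  | succ n ih =>
    have h1 : (0 : Int) ≤ w * ((n : Int) + 1) := mul_nonneg (le_of_lt hw) (by positivity)
    have h2 : w * ((n : Int) + 1) ≤ w * ((n : Int) + 2) := by nlinarith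
    have hcast : ((n + 1 : Nat) : Int) + 1 = (n : Int) + 2 := by push_cast; ring
    rw [hcast]
    rw [show w * ((n : Int) + 2) = w * ((n : Int) + 1) + w * 1 by ring] at h2 ⊢
    rw [PySem.List.pyRange_one_append 0 (w * ((n : Int) + 1)) (w * ((n : Int) + 1) + w * 1) h1 h2]
    rw [List.flatMap_append, ih]
    rw [pv_blockA active w ((n : Int) + 1) (w * ((n : Int) + 1)) (w * ((n : Int) + 1) + w * 1)
        hw (by positivity) rfl (by ring)]
    rw [if_neg (by omega : ¬ ((n : Int) + 1 = 0))]
    rw [show ((n : Int) + 2) = ((n : Int) + 1) + 1 by ring,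
        PySem.List.pyRange_one_succ_right (by positivity : (0 : Int) ≤ (n : Int) + 1)]
    rw [List.map_append, List.map_singleton]
    rw [PySem.List.pyRange_one_cons (by positivity : (0 : Int) < (n : Int) + 1), List.map_cons]
    rw [pv_join_snoc]
    rw [← List.map_cons, ← PySem.List.pyRange_one_cons (by positivity : (0 : Int) < (n : Int) + 1)]
    simp [List.append_assoc]

lemma pv_altList (active : List Int) (w l : Int) (hw : 0 < w) (hl : 0 < l) :
    (get_screen_alt active w l).toList
      = PySem.Chars.join ['\n'] ((PySem.List.pyRange 0 l 1).map (pvRow active w)) := by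
  unfold get_screen_alt
  rw [if_neg (by omega)]
  simp only [PySem.Str.toList_join, List.map_map]
  have hsep : ("\n" : String).toList = ['\n'] := by decide
  rw [hsep]
  congr 1
  apply List.map_congr_left
  intro r _
  simp only [Function.comp_apply, PySem.Str.toList_join, List.map_map]
  have hempty : ("" : String).toList = [] := by decide
  rw [hempty]
  have hcells : (String.toList ∘ fun c =>
        if PySem.Set.contains (PySem.Set.ofList active) (r * w + c) then "#" else ".")
      = (fun c => [pvCell active (r * w + c)]) := by
    funext c
    by_cases h : (r * w + c) ∈ active
    · simp [pvCell, h, PySem.Set.mem_ofList]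
    · simp [pvCell, h, PySem.Set.mem_ofList]
  rw [hcells]
  rw [show (fun c => [pvCell active (r * w + c)])
        = (fun ch => [ch]) ∘ (fun c => pvCell active (r * w + c)) from rfl]
  rw [← List.map_map, PySem.Chars.join_nil_singletons]
  rfl

lemma pv_posCase (active : List Int) (w l : Int) (hw : 0 < w) (hl : 0 < l) :
    get_screen active w l = get_screen_alt active w l := by
  apply String.toList_inj.mp
  unfold get_screen
  rw [pv_foldA]
  have hn : l = ((l.toNat - 1 : Nat) : Int) + 1 := by omega
  rw [pv_altList active w l hw hl]
  rw [show (("" : String).toList = ([] : List Char)) from rfl, List.nil_append]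
  rw [hn, pv_main active w hw (l.toNat - 1)]

-- ===== VERDICT (by name: the statement is the Claim_ definition above) =====
theorem get_screen_spec : Claim_unchanged_get_screen := by
  intro active width lines _ hnD
  by_cases hpos : 0 < width ∧ 0 < lines
  · exact pv_posCase active width lines hpos.1 hpos.2
  · have hwl : width * lines ≤ 0 := by
      unfold D_get_screen at hnD
      rcases lt_trichotomy width 0 with hw | hw | hw
      · have hl : 0 ≤ lines := by omega
        exact mul_nonpos_of_nonpos_of_nonneg (le_of_lt hw) hl
      · simp [hw]
      · have hl : lines ≤ 0 := by omega
        exact mul_nonpos_of_nonneg_of_nonpos (le_of_lt hw) hl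
    unfold get_screen get_screen_alt
    rw [PySem.List.pyRange_one_eq_nil hwl, if_pos (by omega)]
    rfl

theorem get_screen_changed : Claim_changed_get_screen := by
  unfold Claim_changed_get_screen; decide

theorem get_screen_tight : Claim_exact_get_screen := by
  intro active width lines _ hD
  obtain ⟨hw, hl⟩ := hD
  have hB : get_screen_alt active width lines = "" := by
    unfold get_screen_alt
    rw [if_pos (Or.inl (le_of_lt hw))]
  rw [hB]
  intro hA
  have hwl : 0 < width * lines := mul_pos_of_neg_of_neg hw hl
  have := congrArg String.toList hA
  rw [show (("" : String).toList = ([] : List Char)) from rfl] at this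
  unfold get_screen at this
  rw [pv_foldA, PySem.List.pyRange_one_cons hwl, List.flatMap_cons] at this
  have h0 : pvGA active width 0 = [pvCell active 0] := by simp [pvGA]
  rw [h0] at this
  simp at this
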